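-- pv_equiv track=rewrite | github.com/NWils98/hypergraph-epidemic-sensitivity | analysis/analysis_plot.py | family_sort_key
-- ===== SOURCE A (Python) =====
-- from typing import Dict, List, Tuple, Optional
--
-- def family_sort_key(pop: str) -> Tuple[int, str]:
--     order = [
--         ("P1_", 1), ("P2_", 1),
--         ("P3_", 2), ("P4_", 2), ("P5_", 2),
--         ("P6_", 3), ("P7_", 3),
--         ("P8_", 4), ("P9_", 4),
--         ("P10_", 5), ("P11_", 5),
--     ]
--     for pref, k in order:
--         if str(pop).startswith(pref):
--             return (k, str(pop))
--     if "pop_belgium600k_c500_teachers_censushh" in str(pop):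
--         return (0, str(pop))
--     return (99, str(pop))
-- ===== SOURCE B (Python) =====
-- def family_sort_key(pop):
--     group = {"1": 1, "2": 1, "3": 2, "4": 2, "5": 2,
--              "6": 3, "7": 3, "8": 4, "9": 4, "10": 5, "11": 5}
--     s = str(pop)
--     if s.startswith("P"):
--         digits, rest = "", s[1:]
--         while rest and rest[0].isdigit():
--             digits += rest[0]
--             rest = rest[1:]
--         if rest.startswith("_") and digits in group:
--             return (group[digits], s)
--     if "pop_belgium600k_c500_teachers_censushh" in s:
--         return (0, s)
--     return (99, s)
-- ===== Notes on version B (the rewrite author's own statement) =====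
-- stated objective: idiomatic
-- what changed: B parses the family number once (leading 'P', a digit run, then '_') and looks the parsed number up in a single table, instead of A's linear scan testing the string against eleven hard-coded prefixes.
import Mathlib
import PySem

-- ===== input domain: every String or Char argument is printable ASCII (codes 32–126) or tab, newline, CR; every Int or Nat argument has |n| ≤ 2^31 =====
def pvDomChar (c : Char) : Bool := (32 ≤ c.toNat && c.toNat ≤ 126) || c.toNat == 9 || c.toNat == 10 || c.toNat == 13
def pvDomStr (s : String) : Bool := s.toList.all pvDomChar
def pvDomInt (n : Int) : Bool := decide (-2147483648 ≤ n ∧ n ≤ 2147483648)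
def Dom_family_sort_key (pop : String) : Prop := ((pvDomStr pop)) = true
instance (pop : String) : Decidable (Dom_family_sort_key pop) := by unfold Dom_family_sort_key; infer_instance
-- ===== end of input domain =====

-- B parses the family number once ("P" + digit run + "_") and looks it up in a table,
-- instead of A's linear scan over eleven prefixes; objective: idiomatic parse-and-lookup.

-- ===== PORT A =====
def pvOrder : List (String × Int) :=
  [("P1_", 1), ("P2_", 1), ("P3_", 2), ("P4_", 2), ("P5_", 2),
   ("P6_", 3), ("P7_", 3), ("P8_", 4), ("P9_", 4), ("P10_", 5), ("P11_", 5)]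

-- the for-loop with early return over `order`
def pvALoop (pop : String) : List (String × Int) → Option (Int × String)
  | [] => none
  | (pref, k) :: rest =>
      if PySem.Str.startswith pop pref then some (k, pop) else pvALoop pop rest

def family_sort_key (pop : String) : Int × String :=
  match pvALoop pop pvOrder with
  | some r => r
  | none =>
      if PySem.Str.isIn "pop_belgium600k_c500_teachers_censushh" pop then (0, pop)
      else (99, pop)

-- ===== PORT B =====
-- the while-loop `while rest and rest[0].isdigit(): digits += rest[0]; rest = rest[1:]`
def pvBScan : List Char → List Char → List Char × List Char
  | digits, [] => (digits, [])
  | digits, c :: rest =>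
      if PySem.Chars.isdigit c then pvBScan (digits ++ [c]) rest else (digits, c :: rest)

-- the dict literal `group`
def pvGroup : PySem.Dict (List Char) Int :=
  PySem.Dict.ofList
    [(['1'], 1), (['2'], 1), (['3'], 2), (['4'], 2), (['5'], 2),
     (['6'], 3), (['7'], 3), (['8'], 4), (['9'], 4), (['1','0'], 5), (['1','1'], 5)]

def family_sort_key_alt (pop : String) : Int × String :=
  let s := pop.toList
  let hit : Option (Int × String) :=
    if PySem.Chars.startswith s ['P'] then
      let (digits, rest) := pvBScan [] (s.drop 1)
      if PySem.Chars.startswith rest ['_'] then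
        match pvGroup.get? digits with          -- `digits in group` / `group[digits]`
        | some g => some (g, pop)
        | none => none
      else none
    else none
  match hit with
  | some r => r
  | none =>
      if PySem.Chars.isIn "pop_belgium600k_c500_teachers_censushh".toList s then (0, pop)
      else (99, pop)

-- ===== PRECONDITION & SPEC =====
def Spec_family_sort_key (pop : String) (out : Int × String) : Prop := out = family_sort_key_alt pop
instance (pop : String) (out : Int × String) : Decidable (Spec_family_sort_key pop out) := by unfold Spec_family_sort_key; infer_instance

-- ===== CLAIM (what is proved, stated in full; the proofs are below) =====
def Claim_equal_family_sort_key : Prop := ∀ (pop : String), Dom_family_sort_key pop → Spec_family_sort_key pop (family_sort_key pop)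

-- ===== LEMMAS AND PROOFS =====

-- shared fallback (the belgium-substring / 99 tail, identical in A and B)
def pvFallback (cs : List Char) (pop : String) : Int × String :=
  if PySem.Chars.isIn "pop_belgium600k_c500_teachers_censushh".toList cs then (0, pop)
  else (99, pop)

-- A's prefix loop, restated over the char list of the input
def pvAHit (cs : List Char) (pop : String) : Option (Int × String) :=
  if ['P','1','_'].isPrefixOf cs then some ((1:Int), pop)
  else if ['P','2','_'].isPrefixOf cs then some (1, pop)
  else if ['P','3','_'].isPrefixOf cs then some (2, pop)
  else if ['P','4','_'].isPrefixOf cs then some (2, pop)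
  else if ['P','5','_'].isPrefixOf cs then some (2, pop)
  else if ['P','6','_'].isPrefixOf cs then some (3, pop)
  else if ['P','7','_'].isPrefixOf cs then some (3, pop)
  else if ['P','8','_'].isPrefixOf cs then some (4, pop)
  else if ['P','9','_'].isPrefixOf cs then some (4, pop)
  else if ['P','1','0','_'].isPrefixOf cs then some (5, pop)
  else if ['P','1','1','_'].isPrefixOf cs then some (5, pop)
  else none

def pvACore (cs : List Char) (pop : String) : Int × String :=
  match pvAHit cs pop with
  | some r => r
  | none => pvFallback cs pop

-- B's parse-and-look-up, restated over the char list of the input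
def pvBHit (cs : List Char) (pop : String) : Option (Int × String) :=
  if PySem.Chars.startswith cs ['P'] then
    let (digits, rest) := pvBScan [] (cs.drop 1)
    if PySem.Chars.startswith rest ['_'] then
      match pvGroup.get? digits with
      | some g => some (g, pop)
      | none => none
    else none
  else none

def pvBCore (cs : List Char) (pop : String) : Int × String :=
  match pvBHit cs pop with
  | some r => r
  | none => pvFallback cs pop

lemma pvA_eq (pop : String) : family_sort_key pop = pvACore pop.toList pop := by
  rfl

lemma pvB_eq (pop : String) : family_sort_key_alt pop = pvBCore pop.toList pop := by
  rfl

lemma pvBScan_eq (cs acc : List Char) :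
    pvBScan acc cs = (acc ++ cs.takeWhile PySem.Chars.isdigit, cs.dropWhile PySem.Chars.isdigit) := by
  induction cs generalizing acc with
  | nil => simp [pvBScan]
  | cons c cs ih =>
      by_cases h : PySem.Chars.isdigit c = true <;>
        simp [pvBScan, h, ih, List.takeWhile_cons, List.dropWhile_cons]

lemma pvne {c d : Char} (hc : PySem.Chars.isdigit c = false)
    (hd : PySem.Chars.isdigit d = true) : d ≠ c := by
  rintro rfl; rw [hc] at hd; exact Bool.false_ne_true hd

lemma pvDigit_cases (c : Char) (h : PySem.Chars.isdigit c = true) :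
    c = '0' ∨ c = '1' ∨ c = '2' ∨ c = '3' ∨ c = '4' ∨ c = '5' ∨ c = '6' ∨ c = '7' ∨ c = '8' ∨ c = '9' := by
  simp only [PySem.Chars.isdigit, Bool.and_eq_true, decide_eq_true_eq] at h
  obtain ⟨h1, h2⟩ := h
  rw [Char.le_def] at h1 h2
  have h1' : 48 ≤ c.toNat := h1
  have h2' : c.toNat ≤ 57 := h2
  have hc : c = Char.ofNat c.toNat := (Char.ofNat_toNat c).symm
  interval_cases h : c.toNat <;> subst hc <;> decide

lemma pvGroup_get? (ds : List Char) : pvGroup.get? ds =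
    if ['1'] = ds then some 1 else if ['2'] = ds then some 1
    else if ['3'] = ds then some 2 else if ['4'] = ds then some 2
    else if ['5'] = ds then some 2 else if ['6'] = ds then some 3
    else if ['7'] = ds then some 3 else if ['8'] = ds then some 4
    else if ['9'] = ds then some 4 else if ['1','0'] = ds then some 5
    else if ['1','1'] = ds then some 5 else none := by
  rw [show pvGroup = PySem.Dict.mk
    [(['1'], 1), (['2'], 1), (['3'], 2), (['4'], 2), (['5'], 2),
     (['6'], 3), (['7'], 3), (['8'], 4), (['9'], 4), (['1','0'], 5), (['1','1'], 5)] from rfl]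
  rw [PySem.Dict.get?_mk_cons, PySem.Dict.get?_mk_cons, PySem.Dict.get?_mk_cons,
    PySem.Dict.get?_mk_cons, PySem.Dict.get?_mk_cons, PySem.Dict.get?_mk_cons,
    PySem.Dict.get?_mk_cons, PySem.Dict.get?_mk_cons, PySem.Dict.get?_mk_cons,
    PySem.Dict.get?_mk_cons, PySem.Dict.get?_mk_cons]
  simp only [beq_iff_eq, PySem.Dict.get?, List.find?, Option.map]

lemma pvDigitFacts :
    PySem.Chars.isdigit '0' = true ∧ PySem.Chars.isdigit '1' = true ∧
    PySem.Chars.isdigit '2' = true ∧ PySem.Chars.isdigit '3' = true ∧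
    PySem.Chars.isdigit '4' = true ∧ PySem.Chars.isdigit '5' = true ∧
    PySem.Chars.isdigit '6' = true ∧ PySem.Chars.isdigit '7' = true ∧
    PySem.Chars.isdigit '8' = true ∧ PySem.Chars.isdigit '9' = true ∧
    PySem.Chars.isdigit '_' = false ∧ PySem.Chars.isdigit 'P' = false := by decide

set_option maxRecDepth 8000 in
set_option maxHeartbeats 4000000 in
lemma pvHit_eq (cs : List Char) (pop : String) : pvAHit cs pop = pvBHit cs pop := by
  rcases cs with _ | ⟨c0, cs1⟩
  · simp [pvAHit, pvBHit, List.isPrefixOf, PySem.Chars.startswith]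
  by_cases h0 : c0 = 'P'
  case neg => simp [pvAHit, pvBHit, List.isPrefixOf, PySem.Chars.startswith, Ne.symm h0]
  subst h0
  rcases cs1 with _ | ⟨c1, cs2⟩
  · simp [pvAHit, pvBHit, List.isPrefixOf, PySem.Chars.startswith, pvBScan_eq, pvGroup_get?,
      List.drop, pvDigitFacts]
  by_cases h1 : PySem.Chars.isdigit c1 = true
  case neg =>
    rw [Bool.not_eq_true] at h1
    by_cases hu : c1 = '_'
    · subst hu
      simp [pvAHit, pvBHit, List.isPrefixOf, PySem.Chars.startswith, pvBScan_eq, pvGroup_get?,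
        List.drop, List.takeWhile_cons, List.dropWhile_cons, pvDigitFacts]
    · simp [pvAHit, pvBHit, List.isPrefixOf, PySem.Chars.startswith, pvBScan_eq, pvGroup_get?,
        List.drop, List.takeWhile_cons, List.dropWhile_cons, pvDigitFacts, h1, Ne.symm hu,
        pvne h1 pvDigitFacts.1, pvne h1 pvDigitFacts.2.1,
        pvne h1 pvDigitFacts.2.2.1, pvne h1 pvDigitFacts.2.2.2.1,
        pvne h1 pvDigitFacts.2.2.2.2.1, pvne h1 pvDigitFacts.2.2.2.2.2.1,
        pvne h1 pvDigitFacts.2.2.2.2.2.2.1, pvne h1 pvDigitFacts.2.2.2.2.2.2.2.1,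
        pvne h1 pvDigitFacts.2.2.2.2.2.2.2.2.1, pvne h1 pvDigitFacts.2.2.2.2.2.2.2.2.2.1]
  rcases cs2 with _ | ⟨c2, cs3⟩
  · rcases pvDigit_cases c1 h1 with rfl|rfl|rfl|rfl|rfl|rfl|rfl|rfl|rfl|rfl <;>
      simp [pvAHit, pvBHit, List.isPrefixOf, PySem.Chars.startswith, pvBScan_eq, pvGroup_get?,
        List.drop, List.takeWhile_cons, List.dropWhile_cons, pvDigitFacts]
  by_cases h2 : PySem.Chars.isdigit c2 = true
  case neg =>
    rw [Bool.not_eq_true] at h2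
    by_cases hu2 : c2 = '_'
    · subst hu2
      rcases pvDigit_cases c1 h1 with rfl|rfl|rfl|rfl|rfl|rfl|rfl|rfl|rfl|rfl <;>
        simp [pvAHit, pvBHit, List.isPrefixOf, PySem.Chars.startswith, pvBScan_eq, pvGroup_get?,
          List.drop, List.takeWhile_cons, List.dropWhile_cons, pvDigitFacts]
    · rcases pvDigit_cases c1 h1 with rfl|rfl|rfl|rfl|rfl|rfl|rfl|rfl|rfl|rfl <;>
        simp [pvAHit, pvBHit, List.isPrefixOf, PySem.Chars.startswith, pvBScan_eq, pvGroup_get?,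
          List.drop, List.takeWhile_cons, List.dropWhile_cons, pvDigitFacts, h2, Ne.symm hu2,
          pvne h2 pvDigitFacts.1, pvne h2 pvDigitFacts.2.1]
  case pos =>
    rcases pvDigit_cases c1 h1 with rfl|rfl|rfl|rfl|rfl|rfl|rfl|rfl|rfl|rfl <;>
      rcases pvDigit_cases c2 h2 with rfl|rfl|rfl|rfl|rfl|rfl|rfl|rfl|rfl|rfl <;>
      (rcases cs3 with _ | ⟨c3, cs4⟩
       · simp [pvAHit, pvBHit, List.isPrefixOf, PySem.Chars.startswith, pvBScan_eq, pvGroup_get?,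
           List.drop, List.takeWhile_cons, List.dropWhile_cons, pvDigitFacts]
       · by_cases h3 : PySem.Chars.isdigit c3 = true
         · simp [pvAHit, pvBHit, List.isPrefixOf, PySem.Chars.startswith, pvBScan_eq, pvGroup_get?,
             List.drop, List.takeWhile_cons, List.dropWhile_cons, pvDigitFacts, h3,
             Ne.symm (pvne pvDigitFacts.2.2.2.2.2.2.2.2.2.2.1 h3)]
         · rw [Bool.not_eq_true] at h3
           by_cases hu3 : c3 = '_'
           · subst hu3
             simp [pvAHit, pvBHit, List.isPrefixOf, PySem.Chars.startswith, pvBScan_eq, pvGroup_get?,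
               List.drop, List.takeWhile_cons, List.dropWhile_cons, pvDigitFacts]
           · simp [pvAHit, pvBHit, List.isPrefixOf, PySem.Chars.startswith, pvBScan_eq, pvGroup_get?,
               List.drop, List.takeWhile_cons, List.dropWhile_cons, pvDigitFacts, h3, Ne.symm hu3])

lemma pvCore_eq (cs : List Char) (pop : String) : pvACore cs pop = pvBCore cs pop := by
  unfold pvACore pvBCore
  rw [pvHit_eq]

-- ===== VERDICT (by name: the statement is the Claim_ definition above) =====
theorem family_sort_key_spec : Claim_equal_family_sort_key := by
  intro pop _
  unfold Spec_family_sort_key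
  rw [pvA_eq, pvB_eq, pvCore_eq]
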